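-- pv_equiv track=rewrite | github.com/eugen-paul/ProblemsPython | LeetCode/Problems/1000_1999/1600_1699/1675_MinimizeDeviationInArray.py | minimumDeviation_1
-- ===== SOURCE A (Python) =====
-- from typing import List, Dict, Tuple, Counter
-- import bisect
--
-- def minimumDeviation_1(nums: List[int]) -> int:
--     for i, n in enumerate(nums):
--         if n & 1 == 1:
--             nums[i] = n*2
--
--     nums = sorted(set(nums))
--     min_delta = nums[-1] - nums[0]
--
--     while nums[-1] & 1 == 0:
--         t = nums.pop()
--         bisect.insort_right(nums, t // 2)
--         min_delta = min(min_delta, nums[-1] - nums[0])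
--
--     return min_delta
-- ===== SOURCE B (Python) =====
-- def minimumDeviation_1(nums):
--     # Leftist max-heap: repeatedly halve the top while tracking the running minimum.
--     # (A doubles the odd entries of its argument in place; B does not mutate it —
--     #  the equivalence is about the return value.)
--     vals = {n * 2 if n & 1 else n for n in nums}
--     if len(vals) == 1:
--         return 0
--     mn = min(vals)
--     heap = None
--     for v in vals:
--         heap = _merge(heap, (1, v, None, None))
--     best = heap[1] - mn
--     while heap[1] & 1 == 0:
--         half = heap[1] // 2
--         heap = _merge(_merge(heap[2], heap[3]), (1, half, None, None))
--         mn = min(mn, half)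
--         best = min(best, heap[1] - mn)
--     return best
--
--
-- def _rank(h):
--     return h[0] if h else 0
--
--
-- def _mk(v, a, b):
--     # rebuild a node keeping the leftist rank invariant
--     if _rank(a) >= _rank(b):
--         return (_rank(b) + 1, v, a, b)
--     return (_rank(a) + 1, v, b, a)
--
--
-- def _merge(a, b):
--     # merge two leftist max-heaps; a node is (rank, value, left, right), None is empty
--     if a is None:
--         return b
--     if b is None:
--         return a
--     if a[1] < b[1]:
--         a, b = b, a
--     return _mk(a[1], a[2], _merge(a[3], b))
-- ===== Notes on version B (the rewrite author's own statement) =====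
-- stated objective: alternative
-- what changed: replaces the sorted-list simulation (pop the max and bisect.insort its half, O(n) per step) by a leftist max-heap with O(log n) pop/push plus a separately tracked running minimum, and returns 0 immediately when only one distinct value remains
import Mathlib
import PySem

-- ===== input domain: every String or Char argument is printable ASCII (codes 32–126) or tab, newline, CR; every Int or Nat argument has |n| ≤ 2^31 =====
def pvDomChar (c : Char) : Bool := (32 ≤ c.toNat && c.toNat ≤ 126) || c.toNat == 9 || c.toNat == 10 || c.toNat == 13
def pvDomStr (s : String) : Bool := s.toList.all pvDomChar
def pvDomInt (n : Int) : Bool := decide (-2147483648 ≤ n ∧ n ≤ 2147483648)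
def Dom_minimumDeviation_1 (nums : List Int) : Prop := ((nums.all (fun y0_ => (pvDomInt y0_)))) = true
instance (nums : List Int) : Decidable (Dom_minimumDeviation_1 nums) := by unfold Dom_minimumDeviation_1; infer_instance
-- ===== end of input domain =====

-- B replaces A's sorted-list simulation by a leftist max-heap with a running minimum (return value only:
-- A doubles the odd entries of its argument in place, B does not mutate it).

-- ===== PORT A =====
-- the while loop: while nums[-1] & 1 == 0, pop the max, insort its half, update min_delta
-- (fuel makes the loop total; it never runs out on the admitted inputs)
def goA : Nat → List Int → Int → Int
  | 0, _, d => d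
  | fuel+1, l, d =>
    if PySem.Int.band (PySem.List.pyGetD l (-1) 0) 1 == 0 then
      let t := PySem.List.pyGetD l (-1) 0
      let l1 := l.dropLast
      let i := PySem.List.bisectRight l1 (PySem.Int.floordiv t 2)
      let l2 := l1.take i ++ PySem.Int.floordiv t 2 :: l1.drop i
      goA fuel l2 (min d (PySem.List.pyGetD l2 (-1) 0 - PySem.List.pyGetD l2 0 0))
    else d

def minimumDeviation_1 (nums : List Int) : Int :=
  let nums2 := (PySem.List.enumerate nums 0).foldl
    (fun acc p => if PySem.Int.band p.2 1 == 1 then PySem.List.pySetD acc p.1 (p.2 * 2) else acc) nums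
  let l := PySem.List.sorted (PySem.Set.ofList nums2) (fun x => x) false
  goA (33 * nums.length + 1) l (PySem.List.pyGetD l (-1) 0 - PySem.List.pyGetD l 0 0)

-- ===== PORT B =====
-- leftist max-heap: a node carries (rank, value, left child, right child)
inductive LH : Type
  | nil : LH
  | node : Nat → Int → LH → LH → LH
deriving DecidableEq, Repr

def LH.rank : LH → Nat
  | .nil => 0
  | .node s _ _ _ => s

-- the _mk helper of Source B: rebuild a node keeping the leftist rank invariant
def LH.mk (v : Int) (a b : LH) : LH :=
  if a.rank ≥ b.rank then .node (b.rank + 1) v a b else .node (a.rank + 1) v b a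

def LH.merge : LH → LH → LH
  | .nil, b => b
  | .node s x al ar, .nil => .node s x al ar
  | .node s x al ar, .node t y bl br =>
    if x < y then LH.mk y bl (LH.merge br (.node s x al ar))
    else LH.mk x al (LH.merge ar (.node t y bl br))
termination_by a b => sizeOf a + sizeOf b
decreasing_by all_goals (simp; try omega)

def LH.rootD : LH → Int → Int
  | .nil, d => d
  | .node _ x _ _, _ => x

-- the while loop of Source B: while the top is even, pop it, push its half, update mn and best
def goB : Nat → LH → Int → Int → Int
  | 0, _, _, best => best
  | _+1, .nil, _, best => best
  | fuel+1, .node _s x hl hr, mn, best =>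
    if PySem.Int.band x 1 == 0 then
      let half := PySem.Int.floordiv x 2
      let h' := LH.merge (LH.merge hl hr) (.node 1 half .nil .nil)
      let mn' := min mn half
      goB fuel h' mn' (min best (LH.rootD h' 0 - mn'))
    else best

def minimumDeviation_1_alt (nums : List Int) : Int :=
  let vals : List Int := PySem.Set.ofList (nums.map (fun n => if PySem.Int.band n 1 == 1 then n * 2 else n))
  if vals.length == 1 then 0
  else
    let mn := (PySem.List.min? vals (fun x => x)).getD 0
    let h := vals.foldl (fun h v => LH.merge h (.node 1 v .nil .nil)) .nil
    goB (33 * nums.length + 1) h mn (LH.rootD h 0 - mn)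

-- ===== PRECONDITION & SPEC =====
-- A raises IndexError on the empty list, and loops forever when 0 occurs and no element is
-- positive (the maximum is then stuck at the even value 0); on every other input A returns.
def Pre_minimumDeviation_1 (nums : List Int) : Prop :=
  nums ≠ [] ∧ ((0 : Int) ∈ nums → ∃ n ∈ nums, 0 < n)
instance (nums : List Int) : Decidable (Pre_minimumDeviation_1 nums) := by
  unfold Pre_minimumDeviation_1; infer_instance
def pvWitness_minimumDeviation_1 : List Int := [4, 1, 5, 20, 3]

def Spec_minimumDeviation_1 (nums : List Int) (out : Int) : Prop := out = minimumDeviation_1_alt nums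
instance (nums : List Int) (out : Int) : Decidable (Spec_minimumDeviation_1 nums out) := by unfold Spec_minimumDeviation_1; infer_instance

-- ===== CLAIM (what is proved, stated in full; the proofs are below) =====
def Claim_equal_minimumDeviation_1 : Prop := ∀ (nums : List Int), Dom_minimumDeviation_1 nums → Pre_minimumDeviation_1 nums → Spec_minimumDeviation_1 nums (minimumDeviation_1 nums)

-- ===== LEMMAS AND PROOFS =====

def LH.toL : LH → List Int
  | .nil => []
  | .node _ x l r => x :: (LH.toL l ++ LH.toL r)

def LH.IsHeap : LH → Prop
  | .nil => True
  | .node _ x l r => (∀ y ∈ LH.toL l, y ≤ x) ∧ (∀ y ∈ LH.toL r, y ≤ x) ∧ LH.IsHeap l ∧ LH.IsHeap r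

theorem LH.toL_mk_perm (v : Int) (a b : LH) : (LH.mk v a b).toL.Perm (v :: (a.toL ++ b.toL)) := by
  unfold LH.mk; split <;> simp only [LH.toL] <;>
    first | exact List.Perm.refl _ | exact List.Perm.cons _ List.perm_append_comm
theorem LH.toL_merge_perm (a b : LH) : (LH.merge a b).toL.Perm (a.toL ++ b.toL) := by
  fun_induction LH.merge a b <;> simp only [LH.toL, List.append_nil, List.nil_append] <;>
    try exact List.Perm.refl _
  case case3 s x al ar t y bl br hlt ih =>
    refine (LH.toL_mk_perm ..).trans ?_
    rw [← Multiset.coe_eq_coe] at *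
    simp only [LH.toL, ← Multiset.cons_coe, ← Multiset.coe_add, ← Multiset.singleton_add] at *
    rw [ih]; abel
  case case4 s x al ar t y bl br hlt ih =>
    refine (LH.toL_mk_perm ..).trans ?_
    rw [← Multiset.coe_eq_coe] at *
    simp only [LH.toL, ← Multiset.cons_coe, ← Multiset.coe_add, ← Multiset.singleton_add] at *
    rw [ih]; abel

theorem LH.mem_toL_merge {y : Int} (a b : LH) :
    y ∈ (LH.merge a b).toL ↔ y ∈ a.toL ++ b.toL :=
  (LH.toL_merge_perm a b).mem_iff

theorem LH.isHeap_mk (v : Int) (a b : LH) (hav : ∀ y ∈ a.toL, y ≤ v) (hbv : ∀ y ∈ b.toL, y ≤ v)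
    (ha : a.IsHeap) (hb : b.IsHeap) : (LH.mk v a b).IsHeap := by
  unfold LH.mk; split <;> exact ⟨by assumption, by assumption, by assumption, by assumption⟩

theorem LH.isHeap_merge (a b : LH) (ha : a.IsHeap) (hb : b.IsHeap) : (LH.merge a b).IsHeap := by
  fun_induction LH.merge a b with
  | case1 => exact hb
  | case2 => exact ha
  | case3 s x al ar t y bl br hlt ih =>
    obtain ⟨hal, har, hhal, hhar⟩ := ha
    obtain ⟨hbl, hbr, hhbl, hhbr⟩ := hb
    refine LH.isHeap_mk _ _ _ hbl ?_ hhbl (ih hhbr (by simp only [LH.IsHeap]; exact ⟨hal, har, hhal, hhar⟩))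
    intro z hz
    rw [LH.mem_toL_merge] at hz
    simp only [List.mem_append, LH.toL, List.mem_cons] at hz
    rcases hz with h | h | h | h
    · exact (hbr _ h)
    · omega
    · exact le_trans (hal _ h) (le_of_lt hlt)
    · exact le_trans (har _ h) (le_of_lt hlt)
  | case4 s x al ar t y bl br hlt ih =>
    obtain ⟨hal, har, hhal, hhar⟩ := ha
    obtain ⟨hbl, hbr, hhbl, hhbr⟩ := hb
    refine LH.isHeap_mk _ _ _ hal ?_ hhal (ih hhar (by simp only [LH.IsHeap]; exact ⟨hbl, hbr, hhbl, hhbr⟩))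
    intro z hz
    rw [LH.mem_toL_merge] at hz
    simp only [List.mem_append, LH.toL, List.mem_cons] at hz
    rcases hz with h | h | h | h
    · exact (har _ h)
    · omega
    · exact le_trans (hbl _ h) (not_lt.mp hlt)
    · exact le_trans (hbr _ h) (not_lt.mp hlt)

theorem sorted_le_getLast (l : List Int) (h : l ≠ []) (hs : l.Pairwise (· ≤ ·))
    (y : Int) (hy : y ∈ l) : y ≤ l.getLast h := by
  induction l with
  | nil => simp at hy
  | cons a t ih =>
    rcases List.mem_cons.mp hy with rfl | hyt
    · cases t with
      | nil => simp [List.getLast]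
      | cons b u =>
        have : y ≤ (b :: u).getLast (by simp) := (List.pairwise_cons.mp hs).1 _ (List.getLast_mem _)
        simpa [List.getLast_cons] using this
    · have hne : t ≠ [] := List.ne_nil_of_mem hyt
      have := ih hne (List.pairwise_cons.mp hs).2 hyt
      simpa [List.getLast_cons hne] using this

theorem sorted_headD_le (l : List Int) (hs : l.Pairwise (· ≤ ·))
    (y : Int) (hy : y ∈ l) : l.headD 0 ≤ y := by
  cases l with
  | nil => simp at hy
  | cons a t =>
    rcases List.mem_cons.mp hy with rfl | hyt
    · simp
    · simpa using (List.pairwise_cons.mp hs).1 _ hyt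

theorem LH.root_isMax (s : Nat) (x : Int) (hl hr : LH) (hh : (LH.node s x hl hr).IsHeap)
    (y : Int) (hy : y ∈ (LH.node s x hl hr).toL) : y ≤ x := by
  obtain ⟨h1, h2, _, _⟩ := hh
  simp only [LH.toL, List.mem_cons, List.mem_append] at hy
  rcases hy with rfl | h | h
  · exact le_refl _
  · exact h1 _ h
  · exact h2 _ h

theorem root_eq_last (l : List Int) (h : LH) (hs : l.Pairwise (· ≤ ·))
    (hp : h.toL.Perm l) (hh : h.IsHeap) (hne : l ≠ []) :
    LH.rootD h 0 = PySem.List.pyGetD l (-1) 0 := by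
  rw [PySem.List.pyGetD_neg_one l 0 hne]
  cases h with
  | nil =>
    have : l = [] := List.Perm.eq_nil (by simpa [LH.toL] using hp.symm)
    exact absurd this hne
  | node s x hl hr =>
    have hx : x ∈ l := hp.mem_iff.mp (by simp [LH.toL])
    have hlast : l.getLast hne ∈ (LH.node s x hl hr).toL :=
      hp.mem_iff.mpr (List.getLast_mem hne)
    exact le_antisymm (LH.root_isMax _ _ _ _ hh _ hlast)
      (sorted_le_getLast l hne hs x hx) |>.symm

theorem insort_perm (m : List Int) (x : Int) :
    (m.take (PySem.List.bisectRight m x) ++ x :: m.drop (PySem.List.bisectRight m x)).Perm (x :: m) := by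
  have h := List.perm_middle (a := x) (l₁ := m.take (PySem.List.bisectRight m x))
    (l₂ := m.drop (PySem.List.bisectRight m x))
  rwa [List.take_append_drop] at h

theorem insort_length (m : List Int) (x : Int) :
    (m.take (PySem.List.bisectRight m x) ++ x :: m.drop (PySem.List.bisectRight m x)).length
      = m.length + 1 := by
  have h := (insort_perm m x).length_eq
  simp only [List.length_cons] at h
  exact h

theorem insort_sorted (m : List Int) (x : Int) (hs : m.Pairwise (· ≤ ·)) :
    (m.take (PySem.List.bisectRight m x) ++ x :: m.drop (PySem.List.bisectRight m x)).Pairwise (· ≤ ·) := by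
  obtain ⟨hle, h2, h3⟩ := PySem.List.bisectRight_spec m x hs
  set i := PySem.List.bisectRight m x with hi
  have hcross : ∀ a ∈ m.take i, ∀ b ∈ m.drop i, a ≤ b := by
    have := hs
    rw [← List.take_append_drop i m, List.pairwise_append] at this
    exact this.2.2
  rw [List.pairwise_append]
  refine ⟨hs.sublist (List.take_sublist _ _), ?_, ?_⟩
  · rw [List.pairwise_cons]
    refine ⟨?_, hs.sublist (List.drop_sublist _ _)⟩
    intro b hb
    obtain ⟨j, hj, rfl⟩ := List.getElem_of_mem hb
    rw [List.getElem_drop]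
    rw [List.length_drop] at hj
    have hj' : i + j < m.length := by omega
    exact le_of_lt (h3 (i + j) hj' (by omega))
  · intro a ha b hb
    rcases List.mem_cons.mp hb with rfl | hbd
    · obtain ⟨j, hj, rfl⟩ := List.getElem_of_mem ha
      rw [List.getElem_take]
      rw [List.length_take] at hj
      have hj' : j < m.length := by omega
      exact h2 j hj' (by omega)
    · exact hcross a ha b hbd

theorem insort_headD (m : List Int) (x : Int) (hm : m ≠ []) (hs : m.Pairwise (· ≤ ·)) :
    (m.take (PySem.List.bisectRight m x) ++ x :: m.drop (PySem.List.bisectRight m x)).headD 0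
      = min x (m.headD 0) := by
  obtain ⟨hle, h2, h3⟩ := PySem.List.bisectRight_spec m x hs
  set i := PySem.List.bisectRight m x with hi
  cases m with
  | nil => exact absurd rfl hm
  | cons a t =>
    cases hic : i with
    | zero =>
      have hx : x < a := by simpa using h3 0 (by simp) (by omega)
      simp [min_eq_left (le_of_lt hx)]
    | succ k =>
      have hax : a ≤ x := by simpa using h2 0 (by simp) (by omega)
      simp [List.take_succ_cons, min_eq_right hax]

theorem pyGetD_zero_eq_headD (l : List Int) (h : l ≠ []) :
    PySem.List.pyGetD l 0 0 = l.headD 0 := by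
  cases l with
  | nil => exact absurd rfl h
  | cons a t => simp [PySem.List.pyGetD, PySem.List.pyGet?, PySem.List.pyIdx?]

theorem headD_append_of_ne_nil (m l' : List Int) (hm : m ≠ []) :
    (m ++ l').headD 0 = m.headD 0 := by
  cases m with
  | nil => exact absurd rfl hm
  | cons a t => simp

theorem goA_succ (fuel : Nat) (l : List Int) (d : Int) :
    goA (fuel+1) l d =
      if PySem.Int.band (PySem.List.pyGetD l (-1) 0) 1 == 0 then
        goA fuel
          (l.dropLast.take (PySem.List.bisectRight l.dropLast (PySem.Int.floordiv (PySem.List.pyGetD l (-1) 0) 2))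
            ++ PySem.Int.floordiv (PySem.List.pyGetD l (-1) 0) 2
              :: l.dropLast.drop (PySem.List.bisectRight l.dropLast (PySem.Int.floordiv (PySem.List.pyGetD l (-1) 0) 2)))
          (min d (PySem.List.pyGetD
              (l.dropLast.take (PySem.List.bisectRight l.dropLast (PySem.Int.floordiv (PySem.List.pyGetD l (-1) 0) 2))
                ++ PySem.Int.floordiv (PySem.List.pyGetD l (-1) 0) 2
                  :: l.dropLast.drop (PySem.List.bisectRight l.dropLast (PySem.Int.floordiv (PySem.List.pyGetD l (-1) 0) 2))) (-1) 0
            - PySem.List.pyGetD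
              (l.dropLast.take (PySem.List.bisectRight l.dropLast (PySem.Int.floordiv (PySem.List.pyGetD l (-1) 0) 2))
                ++ PySem.Int.floordiv (PySem.List.pyGetD l (-1) 0) 2
                  :: l.dropLast.drop (PySem.List.bisectRight l.dropLast (PySem.Int.floordiv (PySem.List.pyGetD l (-1) 0) 2))) 0 0))
      else d := rfl

theorem goB_succ (fuel : Nat) (s : Nat) (x : Int) (hl hr : LH) (mn best : Int) :
    goB (fuel+1) (.node s x hl hr) mn best =
      if PySem.Int.band x 1 == 0 then
        goB fuel (LH.merge (LH.merge hl hr) (.node 1 (PySem.Int.floordiv x 2) .nil .nil))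
          (min mn (PySem.Int.floordiv x 2))
          (min best (LH.rootD (LH.merge (LH.merge hl hr) (.node 1 (PySem.Int.floordiv x 2) .nil .nil)) 0
            - min mn (PySem.Int.floordiv x 2)))
      else best := rfl

theorem main_loop (fuel : Nat) (l : List Int) (h : LH) (mn d : Int)
    (hs : l.Pairwise (· ≤ ·)) (hlen : 2 ≤ l.length) (hh : h.IsHeap)
    (hp : h.toL.Perm l) (hmn : mn = l.headD 0) :
    goA fuel l d = goB fuel h mn d := by
  induction fuel generalizing l h mn d with
  | zero => rfl
  | succ fuel ih =>
    have hne : l ≠ [] := by intro e; rw [e] at hlen; simp at hlen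
    cases hcase : h with
    | nil =>
      exfalso
      have : l = [] := List.Perm.eq_nil (by simpa [hcase, LH.toL] using hp.symm)
      exact hne this
    | node s x hl hr =>
      subst hcase
      have hroot : x = PySem.List.pyGetD l (-1) 0 := root_eq_last l _ hs hp hh hne
      rw [goA_succ, goB_succ, ← hroot]
      by_cases hc : PySem.Int.band x 1 == 0
      · rw [if_pos hc, if_pos hc]
        -- names
        set half := PySem.Int.floordiv x 2 with hhalf
        set m := l.dropLast with hm
        set i := PySem.List.bisectRight m half with hi
        set l2 := m.take i ++ half :: m.drop i with hl2
        set h' := LH.merge (LH.merge hl hr) (LH.node 1 half .nil .nil) with hh'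
        have hmne : m ≠ [] := by
          intro e
          have := congrArg List.length e
          rw [hm] at this; simp [List.length_dropLast] at this; omega
        have hms : m.Pairwise (· ≤ ·) := by
          rw [hm]; exact hs.sublist (List.dropLast_sublist l)
        have hlsplit : l = m ++ [x] := by
          rw [hroot, PySem.List.pyGetD_neg_one l 0 hne, hm]
          exact (List.dropLast_append_getLast hne).symm
        -- perm of the new heap
        have hrest : (hl.toL ++ hr.toL).Perm m := by
          have h1 : (x :: (hl.toL ++ hr.toL)).Perm (x :: m) := by
            have ha : (x :: (hl.toL ++ hr.toL)).Perm l := by simpa [LH.toL] using hp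
            rw [hlsplit] at ha
            exact ha.trans (List.perm_append_singleton ..)
          exact h1.cons_inv
        have hp2 : h'.toL.Perm l2 := by
          have s1 : h'.toL.Perm ((hl.toL ++ hr.toL) ++ [half]) := by
            refine (LH.toL_merge_perm ..).trans ?_
            exact List.Perm.append_right _ (LH.toL_merge_perm ..)
          refine s1.trans ?_
          refine (List.Perm.append_right _ hrest).trans ?_
          exact (List.perm_append_singleton ..).trans (insort_perm m half).symm
        have hh2 : h'.IsHeap := by
          obtain ⟨b1, b2, hhl, hhr⟩ := hh
          refine LH.isHeap_merge _ _ (LH.isHeap_merge _ _ hhl hhr) ?_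
          simp only [LH.IsHeap, LH.toL]
          exact ⟨by simp, by simp, trivial, trivial⟩
        have hs2 : l2.Pairwise (· ≤ ·) := insort_sorted m half hms
        have hlen2 : 2 ≤ l2.length := by
          rw [hl2, insort_length, hm, List.length_dropLast]; omega
        have hmn2 : min mn half = l2.headD 0 := by
          rw [hl2, insort_headD m half hmne hms, hmn, hlsplit,
            headD_append_of_ne_nil m [x] hmne, min_comm]
        have hlast2 : LH.rootD h' 0 = PySem.List.pyGetD l2 (-1) 0 :=
          root_eq_last l2 h' hs2 hp2 hh2 (by intro e; rw [e] at hlen2; simp at hlen2)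
        have hhead2 : PySem.List.pyGetD l2 0 0 = min mn half := by
          rw [pyGetD_zero_eq_headD l2 (by intro e; rw [e] at hlen2; simp at hlen2), hmn2]
        rw [hlast2, hhead2]
        exact ih l2 h' (min mn half) _ hs2 hlen2 hh2 hp2 hmn2
      · rw [if_neg hc, if_neg hc]

theorem foldl_enum_set (post pre : List Int) :
    (PySem.List.enumerate post (pre.length : Int)).foldl
      (fun acc p => if PySem.Int.band p.2 1 == 1 then PySem.List.pySetD acc p.1 (p.2 * 2) else acc)
      (pre ++ post)
    = pre ++ post.map (fun n => if PySem.Int.band n 1 == 1 then n * 2 else n) := by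
  induction post generalizing pre with
  | nil => simp [PySem.List.enumerate_nil]
  | cons n t ih =>
    rw [PySem.List.enumerate_cons, List.foldl_cons]
    have hset : (if PySem.Int.band n 1 == 1 then
        PySem.List.pySetD (pre ++ n :: t) ((pre.length : Int)) (n * 2) else pre ++ n :: t)
        = (pre ++ [if PySem.Int.band n 1 == 1 then n * 2 else n]) ++ t := by
      by_cases hcond : PySem.Int.band n 1 == 1 <;> simp [hcond, PySem.List.pySetD_natCast]
    rw [hset]
    have harg : (pre.length : Int) + 1 = (((pre ++ [if PySem.Int.band n 1 == 1 then n * 2 else n]).length : Nat) : Int) := by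
      simp
    rw [harg, ih]
    simp

theorem goA_singleton (fuel : Nat) (v : Int) : goA fuel [v] 0 = 0 := by
  induction fuel generalizing v with
  | zero => rfl
  | succ fuel ih =>
    rw [goA_succ]
    by_cases hc : PySem.Int.band (PySem.List.pyGetD [v] (-1) 0) 1 == 0
    · rw [if_pos hc]
      have hBIG : ([v].dropLast.take (PySem.List.bisectRight [v].dropLast (PySem.Int.floordiv (PySem.List.pyGetD [v] (-1) 0) 2))
            ++ PySem.Int.floordiv (PySem.List.pyGetD [v] (-1) 0) 2
              :: [v].dropLast.drop (PySem.List.bisectRight [v].dropLast (PySem.Int.floordiv (PySem.List.pyGetD [v] (-1) 0) 2)))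
          = [PySem.Int.floordiv v 2] := rfl
      rw [hBIG]
      have e1 : PySem.List.pyGetD [PySem.Int.floordiv v 2] (-1) 0 = PySem.Int.floordiv v 2 := rfl
      have e2 : PySem.List.pyGetD [PySem.Int.floordiv v 2] 0 0 = PySem.Int.floordiv v 2 := rfl
      rw [e1, e2, sub_self]
      simpa using ih (PySem.Int.floordiv v 2)
    · rw [if_neg hc]

theorem heap_build (vs : List Int) (h : LH) (hh : h.IsHeap) :
    (vs.foldl (fun h v => LH.merge h (.node 1 v .nil .nil)) h).IsHeap ∧
    (vs.foldl (fun h v => LH.merge h (.node 1 v .nil .nil)) h).toL.Perm (h.toL ++ vs) := by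
  induction vs generalizing h with
  | nil =>
    simp only [List.foldl_nil, List.append_nil]
    exact ⟨hh, List.Perm.refl _⟩
  | cons v t ih =>
    rw [List.foldl_cons]
    have hh1 : (LH.merge h (.node 1 v .nil .nil)).IsHeap := by
      refine LH.isHeap_merge _ _ hh ?_
      simp only [LH.IsHeap, LH.toL]
      exact ⟨by simp, by simp, trivial, trivial⟩
    obtain ⟨ha, hb⟩ := ih _ hh1
    refine ⟨ha, hb.trans ?_⟩
    have : (LH.merge h (.node 1 v .nil .nil)).toL.Perm (h.toL ++ [v]) := by
      simpa [LH.toL] using LH.toL_merge_perm h (.node 1 v .nil .nil)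
    refine (List.Perm.append_right _ this).trans ?_
    rw [List.append_assoc]
    rfl

theorem min?_getD_eq_headD (vals l : List Int) (hvne : vals ≠ [])
    (hs : l.Pairwise (· ≤ ·)) (hp : l.Perm vals) :
    (PySem.List.min? vals (fun x => x)).getD 0 = l.headD 0 := by
  cases e : PySem.List.min? vals (fun x => x) with
  | none => exact absurd ((PySem.List.min?_eq_none_iff vals _).mp e) hvne
  | some m =>
    have hlne : l ≠ [] := by
      intro e2; rw [e2] at hp; exact hvne (hp.symm.eq_nil)
    have hm_l : m ∈ l := hp.mem_iff.mpr (PySem.List.min?_mem e)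
    have hhead_vals : l.headD 0 ∈ vals := by
      refine hp.mem_iff.mp ?_
      cases l with
      | nil => exact absurd rfl hlne
      | cons a t => simp
    simp only [Option.getD_some]
    exact le_antisymm (PySem.List.min?_isMin e _ hhead_vals) (sorted_headD_le l hs m hm_l)


-- ===== VERDICT (by name: the statement is the Claim_ definition above) =====
theorem minimumDeviation_1_spec : Claim_equal_minimumDeviation_1 := by
  intro nums _ hpre
  obtain ⟨hne, -⟩ := hpre
  unfold Spec_minimumDeviation_1 minimumDeviation_1 minimumDeviation_1_alt
  have hmap : (PySem.List.enumerate nums 0).foldl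
      (fun acc p => if PySem.Int.band p.2 1 == 1 then PySem.List.pySetD acc p.1 (p.2 * 2) else acc) nums
      = nums.map (fun n => if PySem.Int.band n 1 == 1 then n * 2 else n) := by
    have h := foldl_enum_set nums []
    simpa using h
  show (let l := PySem.List.sorted (PySem.Set.ofList ((PySem.List.enumerate nums 0).foldl
          (fun acc p => if PySem.Int.band p.2 1 == 1 then PySem.List.pySetD acc p.1 (p.2 * 2) else acc) nums))
          (fun x => x) false
        goA (33 * nums.length + 1) l (PySem.List.pyGetD l (-1) 0 - PySem.List.pyGetD l 0 0))
      = _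
  rw [hmap]
  set V : List Int := PySem.Set.ofList (nums.map (fun n => if PySem.Int.band n 1 == 1 then n * 2 else n)) with hV
  set L : List Int := PySem.List.sorted V (fun x => x) false with hL
  have hperm : L.Perm V := PySem.List.sorted_perm V (fun x => x) false
  have hs : L.Pairwise (· ≤ ·) := PySem.List.sorted_pairwise V (fun x => x)
  have hVne : V ≠ [] := by
    cases nums with
    | nil => exact absurd rfl hne
    | cons a t =>
      have : (if PySem.Int.band a 1 == 1 then a * 2 else a) ∈ V := by
        rw [hV]
        exact (PySem.Set.mem_ofList ..).mpr (by simp)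
      exact List.ne_nil_of_mem this
  have hLne : L ≠ [] := by
    intro e; rw [e] at hperm; exact hVne hperm.symm.eq_nil
  show goA (33 * nums.length + 1) L (PySem.List.pyGetD L (-1) 0 - PySem.List.pyGetD L 0 0)
      = if V.length == 1 then 0
        else goB (33 * nums.length + 1)
          (V.foldl (fun h v => LH.merge h (.node 1 v .nil .nil)) .nil)
          ((PySem.List.min? V (fun x => x)).getD 0)
          (LH.rootD (V.foldl (fun h v => LH.merge h (.node 1 v .nil .nil)) .nil) 0
            - (PySem.List.min? V (fun x => x)).getD 0)
  by_cases hone : (V.length == 1) = true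
  · rw [if_pos hone]
    have hlen1 : L.length = 1 := by rw [hperm.length_eq]; simpa using hone
    obtain ⟨a, ha⟩ := List.length_eq_one_iff.mp hlen1
    rw [ha]
    have e1 : PySem.List.pyGetD [a] (-1) 0 = a := rfl
    have e2 : PySem.List.pyGetD [a] 0 0 = a := rfl
    rw [e1, e2, sub_self]
    exact goA_singleton _ a
  · rw [if_neg hone]
    have hlen2 : 2 ≤ L.length := by
      rw [hperm.length_eq]
      have h1 : V.length ≠ 1 := by simpa using hone
      have h0 : V.length ≠ 0 := by simpa using hVne
      omega
    obtain ⟨hh0, hp0'⟩ := heap_build V .nil trivial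
    have hp0 : (V.foldl (fun h v => LH.merge h (.node 1 v .nil .nil)) .nil).toL.Perm L := by
      refine hp0'.trans ?_
      simpa [LH.toL] using hperm.symm
    have hmn : (PySem.List.min? V (fun x => x)).getD 0 = L.headD 0 :=
      min?_getD_eq_headD V L hVne hs hperm
    have hroot : LH.rootD (V.foldl (fun h v => LH.merge h (.node 1 v .nil .nil)) .nil) 0
        = PySem.List.pyGetD L (-1) 0 := root_eq_last L _ hs hp0 hh0 hLne
    rw [hroot, hmn, ← pyGetD_zero_eq_headD L hLne]
    exact main_loop _ L _ _ _ hs hlen2 hh0 hp0 (pyGetD_zero_eq_headD L hLne)
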